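-- pv_equiv track=rewrite | github.com/edcome/loand | loband.py | makeHeader_2
-- ===== SOURCE A (Python) =====
-- def makeHeader_2(code, models):
--     used_keys = []
--     header = ""
--     for key in models.keys():
--         if not key in used_keys:
--             s_years = set(models[key])
--             used_keys.append(key)
--             res = find_equ(models, used_keys, s_years)
--             if len(header) > 0:
--                 header += " , "
--             header += " ".join(models[key]) + " " + key
--             if len(res) > 0:
--                 header += " " + " ".join(res)
--                 used_keys += res
--     return header
--
-- def find_equ(models, used, s_years):
--     res = []
--     for key in models.keys():
--         if not key in used:
--             if s_years == set(models[key]):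
--                 res.append(key)
--     return res
-- ===== SOURCE B (Python) =====
-- def makeHeader_2(code, models):
--     groups = {}  # frozenset of years -> (years list of first key, [keys])
--     for key in models.keys():
--         fs = frozenset(models[key])
--         if fs in groups:
--             groups[fs][1].append(key)
--         else:
--             groups[fs] = (models[key], [key])
--     return " , ".join(" ".join(ys) + " " + " ".join(ks) for ys, ks in groups.values())
-- ===== Notes on version B (the rewrite author's own statement) =====
-- stated objective: faster
-- what changed: Replaces A's quadratic rescan (find_equ walks all keys for every new group, with list-membership tests on used_keys) by a single pass that groups keys in a dict keyed by frozenset(years), then joins the rendered groups.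
import Mathlib
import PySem

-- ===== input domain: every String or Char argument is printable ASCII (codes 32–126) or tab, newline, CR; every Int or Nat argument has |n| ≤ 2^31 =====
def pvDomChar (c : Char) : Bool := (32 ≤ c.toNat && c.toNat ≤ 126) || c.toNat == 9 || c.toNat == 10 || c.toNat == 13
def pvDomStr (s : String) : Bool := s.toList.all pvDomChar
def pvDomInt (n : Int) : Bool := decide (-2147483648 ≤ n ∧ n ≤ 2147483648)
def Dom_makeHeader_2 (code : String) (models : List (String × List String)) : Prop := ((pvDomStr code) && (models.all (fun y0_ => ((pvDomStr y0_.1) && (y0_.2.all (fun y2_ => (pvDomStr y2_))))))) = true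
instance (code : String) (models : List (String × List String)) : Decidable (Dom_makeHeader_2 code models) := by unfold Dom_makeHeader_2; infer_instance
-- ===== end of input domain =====

-- B builds the header in one pass, grouping keys by their set of years in an
-- insertion-ordered group table, instead of A's rescan of all remaining keys
-- (find_equ) for every new group; objective: faster.


-- ===== PORT A =====
-- models is a Python dict: its key list is the deduplicated first components
-- (on a real dict, dedup is the identity) and models[key] is first-match lookup.
def mh2Lookup (models : List (String × List String)) (k : String) : List String :=
  (PySem.Dict.mk models).getD k []

def mh2Keys (models : List (String × List String)) : List String :=
  PySem.List.dedup (models.map Prod.fst)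

-- find_equ(models, used, s_years)
def findEqu_2 (models : List (String × List String)) (used : List String)
    (sYears : PySem.Set String) : List String :=
  (mh2Keys models).foldl
    (fun res key =>
      if key ∈ used then res
      else if PySem.Set.equal sYears (PySem.Set.ofList (mh2Lookup models key)) then res ++ [key]
      else res) []

-- the body of A's main loop (state = (used_keys, header))
def mh2StepA (models : List (String × List String)) (st : List String × String)
    (key : String) : List String × String :=
  if key ∈ st.1 then st
  else
    let sYears := PySem.Set.ofList (mh2Lookup models key)
    let used1 := st.1 ++ [key]
    let res := findEqu_2 models used1 sYears
    let h1 := if 0 < PySem.Str.len st.2 then st.2 ++ " , " else st.2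
    let h2 := h1 ++ PySem.Str.join " " (mh2Lookup models key) ++ " " ++ key
    if 0 < res.length then (used1 ++ res, h2 ++ " " ++ PySem.Str.join " " res)
    else (used1, h2)

def makeHeader_2 (code : String) (models : List (String × List String)) : String :=
  ((mh2Keys models).foldl (mh2StepA models) ([], "")).2

-- ===== PORT B =====
-- groups is a dict keyed by frozenset(years): an insertion-ordered association
-- list whose key equality is set equality (PySem.Set.equal).
def mh2GroupAdd (gs : List (PySem.Set String × List String × List String))
    (fs : PySem.Set String) (ys : List String) (key : String) :
    List (PySem.Set String × List String × List String) :=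
  match gs with
  | [] => [(fs, ys, [key])]
  | g :: t =>
    if PySem.Set.equal g.1 fs then (g.1, g.2.1, g.2.2 ++ [key]) :: t
    else g :: mh2GroupAdd t fs ys key

def makeHeader_2_alt (code : String) (models : List (String × List String)) : String :=
  let gs := (mh2Keys models).foldl
    (fun gs key =>
      mh2GroupAdd gs (PySem.Set.ofList (mh2Lookup models key)) (mh2Lookup models key) key) []
  PySem.Str.join " , "
    (gs.map (fun g => PySem.Str.join " " g.2.1 ++ " " ++ PySem.Str.join " " g.2.2))

-- ===== PRECONDITION & SPEC =====
def Spec_makeHeader_2 (code : String) (models : List (String × List String)) (out : String) : Prop := out = makeHeader_2_alt code models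
instance (code : String) (models : List (String × List String)) (out : String) : Decidable (Spec_makeHeader_2 code models out) := by unfold Spec_makeHeader_2; infer_instance

-- ===== CLAIM (what is proved, stated in full; the proofs are below) =====
def Claim_equal_makeHeader_2 : Prop := ∀ (code : String) (models : List (String × List String)), Dom_makeHeader_2 code models → Spec_makeHeader_2 code models (makeHeader_2 code models)

-- ===== LEMMAS AND PROOFS =====

def mhPart (g : PySem.Set String × List String × List String) : String :=
  PySem.Str.join " " g.2.1 ++ " " ++ PySem.Str.join " " g.2.2

def mhHeaderFold (h : String) (parts : List String) : String :=
  parts.foldl (fun h p => (if 0 < PySem.Str.len h then h ++ " , " else h) ++ p) h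

lemma mhEqual_symm {s t : PySem.Set String} (h : PySem.Set.equal s t = true) :
    PySem.Set.equal t s = true :=
  (PySem.Set.equal_iff t s).mpr (fun x => ((PySem.Set.equal_iff s t).mp h x).symm)
lemma mhEqual_trans {s t u : PySem.Set String} (h1 : PySem.Set.equal s t = true)
    (h2 : PySem.Set.equal t u = true) : PySem.Set.equal s u = true :=
  (PySem.Set.equal_iff s u).mpr
    (fun x => ((PySem.Set.equal_iff s t).mp h1 x).trans ((PySem.Set.equal_iff t u).mp h2 x))

lemma mhEqual_refl (s : PySem.Set String) : PySem.Set.equal s s = true :=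
  (PySem.Set.equal_iff s s).mpr (fun _ => Iff.rfl)

lemma mh2GroupAdd_nomatch (gs : List (PySem.Set String × List String × List String))
    (fs : PySem.Set String) (ys : List String) (k : String)
    (h : ∀ g ∈ gs, PySem.Set.equal g.1 fs = false) :
    mh2GroupAdd gs fs ys k = gs ++ [(fs, ys, [k])] := by
  induction gs with
  | nil => rfl
  | cons g t ih =>
    have hg := h g (by simp)
    simp only [mh2GroupAdd, hg]
    simp only [Bool.false_eq_true, if_false, List.cons_append, List.cons.injEq, true_and]
    exact ih (fun g' hg' => h g' (by simp [hg']))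

lemma mh2GroupAdd_match (gs : List (PySem.Set String × List String × List String))
    (fs : PySem.Set String) (ys : List String) (k : String)
    (hpw : gs.Pairwise (fun g h => PySem.Set.equal g.1 h.1 = false))
    (h : ∃ g ∈ gs, PySem.Set.equal g.1 fs = true) :
    mh2GroupAdd gs fs ys k
      = gs.map (fun g => if PySem.Set.equal g.1 fs then (g.1, g.2.1, g.2.2 ++ [k]) else g) := by
  induction gs with
  | nil => simp at h
  | cons g t ih =>
    rw [List.pairwise_cons] at hpw
    by_cases hg : PySem.Set.equal g.1 fs = true
    · simp only [mh2GroupAdd, hg, if_true, List.map_cons]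
      have ht : ∀ g' ∈ t, PySem.Set.equal g'.1 fs = false := by
        intro g' hg'
        by_contra hc
        simp only [Bool.not_eq_false] at hc
        have := mhEqual_trans hg (mhEqual_symm hc)   -- equal g.1 g'.1
        rw [hpw.1 g' hg'] at this
        exact Bool.false_ne_true this
      have hmap : t.map (fun g => if PySem.Set.equal g.1 fs then (g.1, g.2.1, g.2.2 ++ [k]) else g) = t := by
        conv_rhs => rw [← List.map_id t]
        apply List.map_congr_left
        intro g' hg'
        simp [ht g' hg']
      rw [hmap]
    · obtain ⟨g', hg', hge⟩ := h
      rcases List.mem_cons.mp hg' with he | hm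
      · rw [← he] at hg; exact absurd hge hg
      · simp only [mh2GroupAdd, hg, List.map_cons, if_false, Bool.false_eq_true]
        rw [ih hpw.2 ⟨g', hm, hge⟩]

def mhE (y : String → List String) (a b : String) : Bool :=
  PySem.Set.equal (PySem.Set.ofList (y a)) (PySem.Set.ofList (y b))

def mhGroups (y : String → List String) :
    List String → List (PySem.Set String × List String × List String)
  | [] => []
  | k :: t =>
    (PySem.Set.ofList (y k), y k, k :: t.filter (fun j => mhE y k j)) ::
      mhGroups y (t.filter (fun j => !mhE y k j))
termination_by l => l.length
decreasing_by
  simp only [List.length_cons, List.length_unattach]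
  exact Nat.lt_succ_of_le ((List.length_filter_le _ _).trans (by simp))

lemma mhFoldB_eq (y : String → List String) :
    ∀ (l : List String) (gs : List (PySem.Set String × List String × List String)),
      gs.Pairwise (fun g h => PySem.Set.equal g.1 h.1 = false) →
      l.foldl (fun gs key => mh2GroupAdd gs (PySem.Set.ofList (y key)) (y key) key) gs
        = gs.map (fun g => (g.1, g.2.1,
              g.2.2 ++ l.filter (fun j => PySem.Set.equal g.1 (PySem.Set.ofList (y j)))))
          ++ mhGroups y (l.filter
              (fun j => gs.all (fun g => !PySem.Set.equal g.1 (PySem.Set.ofList (y j))))) := by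
  intro l
  induction l with
  | nil =>
    intro gs hpw
    simp [mhGroups]
  | cons k t ih =>
    intro gs hpw
    simp only [List.foldl_cons]
    by_cases hm : ∃ g ∈ gs, PySem.Set.equal g.1 (PySem.Set.ofList (y k)) = true
    · -- k joins an existing group
      rw [mh2GroupAdd_match gs _ (y k) k hpw hm]
      rw [ih _ ?hpw']
      case hpw' =>
        refine (List.pairwise_map).mpr ?_
        apply hpw.imp_of_mem ?_
        intro a b ha hb hab
        by_cases h1 : PySem.Set.equal a.1 (PySem.Set.ofList (y k)) = true <;>
          by_cases h2 : PySem.Set.equal b.1 (PySem.Set.ofList (y k)) = true <;>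
          simp [h1, h2, hab]
      -- now both sides
      congr 1
      · rw [List.map_map]
        apply List.map_congr_left
        intro g hg
        by_cases h1 : PySem.Set.equal g.1 (PySem.Set.ofList (y k)) = true
        · simp only [Function.comp, h1, if_pos, List.filter_cons, h1]
          simp [List.append_assoc, h1]
        · simp only [Function.comp]
          rw [if_neg h1]
          simp only [List.filter_cons]
          rw [if_neg (by simpa using h1)]
      · congr 1
        rw [List.filter_cons]
        rw [if_neg ?hk]
        case hk =>
          obtain ⟨g, hg, hge⟩ := hm
          simp only [List.all_eq_true]
          intro hall
          have := hall g hg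
          simp [hge] at this
        apply List.filter_congr
        intro j hj
        simp only [List.all_map]
        apply List.all_congr rfl
        intro g
        by_cases h1 : PySem.Set.equal g.1 (PySem.Set.ofList (y k)) = true <;>
          simp [Function.comp, h1]
    · -- new group
      push_neg at hm
      have hall : ∀ g ∈ gs, PySem.Set.equal g.1 (PySem.Set.ofList (y k)) = false := by
        intro g hg
        exact Bool.eq_false_iff.mpr (hm g hg)
      rw [mh2GroupAdd_nomatch gs _ (y k) k hall]
      rw [ih _ ?hpw2]
      case hpw2 =>
        rw [List.pairwise_append]
        refine ⟨hpw, by simp, ?_⟩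
        intro a ha b hb
        simp only [List.mem_singleton] at hb
        subst hb
        exact hall a ha
      -- assemble the no-match case
      have hfreshk : ((k :: t).filter
          (fun j => gs.all (fun g => !PySem.Set.equal g.1 (PySem.Set.ofList (y j)))))
          = k :: t.filter (fun j => gs.all (fun g => !PySem.Set.equal g.1 (PySem.Set.ofList (y j)))) := by
        rw [List.filter_cons, if_pos (by
          simp only [List.all_eq_true]
          intro g hg
          simp [hall g hg])]
      rw [hfreshk, List.map_append]
      show _ = _ ++ mhGroups y (k :: _)
      rw [mhGroups]
      have hmid : (t.filter (fun j => gs.all (fun g => !PySem.Set.equal g.1 (PySem.Set.ofList (y j))))).filter (fun j => mhE y k j)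
          = t.filter (fun j => PySem.Set.equal (PySem.Set.ofList (y k)) (PySem.Set.ofList (y j))) := by
        rw [List.filter_filter]
        apply List.filter_congr
        intro j hj
        by_cases hkj : PySem.Set.equal (PySem.Set.ofList (y k)) (PySem.Set.ofList (y j)) = true
        · have hfresh : ∀ g ∈ gs, PySem.Set.equal g.1 (PySem.Set.ofList (y j)) = false := by
            intro g hg
            by_contra hc
            rw [Bool.not_eq_false] at hc
            have : PySem.Set.equal g.1 (PySem.Set.ofList (y k)) = true :=
              mhEqual_trans hc (mhEqual_symm hkj)
            rw [hall g hg] at this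
            exact Bool.false_ne_true this
          simp only [mhE, hkj, Bool.true_and, Bool.and_true, List.all_eq_true]
          intro g hg
          simp [hfresh g hg]
        · simp only [mhE]
          rw [Bool.not_eq_true] at hkj
          simp [hkj]
      have htail : (t.filter (fun j => (gs ++ [(PySem.Set.ofList (y k), y k, [k])]).all
            (fun g => !PySem.Set.equal g.1 (PySem.Set.ofList (y j)))))
          = (t.filter (fun j => gs.all (fun g => !PySem.Set.equal g.1 (PySem.Set.ofList (y j))))).filter
              (fun j => !mhE y k j) := by
        rw [List.filter_filter]
        apply List.filter_congr
        intro j hj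
        simp only [List.all_append, List.all_cons, List.all_nil, Bool.and_true, mhE]
        rw [Bool.and_comm]
      rw [hmid, htail, List.append_assoc]
      congr 1
      · apply List.map_congr_left
        intro g hg
        have hdrop : List.filter (fun j => PySem.Set.equal g.1 (PySem.Set.ofList (y j))) (k :: t)
            = List.filter (fun j => PySem.Set.equal g.1 (PySem.Set.ofList (y j))) t := by
          rw [List.filter_cons, if_neg (by simp [hall g hg])]
        rw [hdrop]

lemma mhFoldl_if_if (c d : String → Bool) :
    ∀ (l : List String) (acc : List String),
      l.foldl (fun r j => if c j then r else if d j then r ++ [j] else r) acc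
        = acc ++ l.filter (fun j => !c j && d j) := by
  intro l
  induction l with
  | nil => intro acc; simp
  | cons x t ih =>
    intro acc
    simp only [List.foldl_cons, List.filter_cons]
    by_cases hc : c x = true
    · simp [hc, ih]
    · simp only [Bool.not_eq_true] at hc
      by_cases hd : d x = true
      · simp [hc, hd, ih]
      · simp only [Bool.not_eq_true] at hd
        simp [hc, hd, ih]

lemma findEqu_2_eq_filter (models : List (String × List String)) (used : List String)
    (s : PySem.Set String) :
    findEqu_2 models used s
      = (mh2Keys models).filter
          (fun j => !decide (j ∈ used) && PySem.Set.equal s (PySem.Set.ofList (mh2Lookup models j))) := by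
  unfold findEqu_2
  have := mhFoldl_if_if (fun j => decide (j ∈ used))
    (fun j => PySem.Set.equal s (PySem.Set.ofList (mh2Lookup models j))) (mh2Keys models) []
  simpa using this

lemma mhIntercalate_cons (sep x : List Char) (xs : List (List Char)) (h : xs ≠ []) :
    sep.intercalate (x :: xs) = x ++ sep ++ sep.intercalate xs := by
  cases xs with
  | nil => simp at h
  | cons y ys => simp [List.intercalate, List.intersperse, List.append_assoc]

lemma mhPart_append1 (h1 : String) (ys : List String) (k : String) :
    h1 ++ PySem.Str.join " " ys ++ " " ++ k
      = h1 ++ (PySem.Str.join " " ys ++ " " ++ PySem.Str.join " " [k]) := by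
  apply String.toList_inj.mp
  simp [PySem.Str.join, PySem.Chars.join, List.intercalate, List.append_assoc]

lemma mhPart_append2 (h1 : String) (ys : List String) (k : String) (res : List String)
    (hres : res ≠ []) :
    h1 ++ PySem.Str.join " " ys ++ " " ++ k ++ " " ++ PySem.Str.join " " res
      = h1 ++ (PySem.Str.join " " ys ++ " " ++ PySem.Str.join " " (k :: res)) := by
  apply String.toList_inj.mp
  have : (res.map String.toList) ≠ [] := by simpa using hres
  simp only [String.toList_append, PySem.Str.join, String.toList_ofList, PySem.Chars.join,
    List.map_cons, mhIntercalate_cons _ _ _ this]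
  simp [List.append_assoc]

def mhTailJoin (parts : List String) : String :=
  match parts with
  | [] => ""
  | _ :: _ => " , " ++ PySem.Str.join " , " parts

lemma mhPart_ne (g : PySem.Set String × List String × List String) :
    (mhPart g).toList ≠ [] := by
  simp [mhPart]

lemma mhLen_pos_iff (h : String) : 0 < PySem.Str.len h ↔ h.toList ≠ [] := by
  rw [PySem.Str.len_eq]
  simp only [String.length_toList]
  rw [Int.natCast_pos, Nat.pos_iff_ne_zero, ne_eq, String.length_eq_zero_iff]
  simp [String.toList_eq_nil_iff]

lemma mhJoin_comma_cons (p : String) (ps : List String) (hps : ps ≠ []) :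
    (PySem.Str.join " , " (p :: ps)).toList
      = p.toList ++ " , ".toList ++ (PySem.Str.join " , " ps).toList := by
  simp only [PySem.Str.join, String.toList_ofList, PySem.Chars.join, List.map_cons]
  exact mhIntercalate_cons _ _ _ (by simpa using hps)

lemma mhHeaderFold_go (parts : List String) :
    ∀ (h : String), h.toList ≠ [] →
      mhHeaderFold h parts = h ++ mhTailJoin parts := by
  induction parts with
  | nil =>
    intro h hh
    apply String.toList_inj.mp
    simp [mhHeaderFold, mhTailJoin]
  | cons p ps ih =>
    intro h hh
    have hpos : 0 < PySem.Str.len h := (mhLen_pos_iff h).mpr hh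
    have step : mhHeaderFold h (p :: ps) = mhHeaderFold ((h ++ " , ") ++ p) ps := by
      simp only [mhHeaderFold, List.foldl_cons, if_pos hpos]
    rw [step, ih _ (by simp)]
    apply String.toList_inj.mp
    cases ps with
    | nil => simp [mhTailJoin, PySem.Str.join, PySem.Chars.join, List.intercalate]
    | cons q qs =>
      simp only [mhTailJoin, String.toList_append,
        mhJoin_comma_cons p (q :: qs) (by simp)]
      simp [List.append_assoc]

lemma mhHeaderFold_nil (parts : List String) (hp : ∀ p ∈ parts, p.toList ≠ []) :
    mhHeaderFold "" parts = PySem.Str.join " , " parts := by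
  cases parts with
  | nil => rfl
  | cons p ps =>
    have h0 : ¬ (0 < PySem.Str.len ("" : String)) := by
      rw [mhLen_pos_iff]; simp
    have step : mhHeaderFold "" (p :: ps) = mhHeaderFold ("" ++ p) ps := by
      simp only [mhHeaderFold, List.foldl_cons, if_neg h0]
    have hp' : ("" ++ p).toList ≠ [] := by simpa using hp p (by simp)
    rw [step, mhHeaderFold_go ps _ hp']
    apply String.toList_inj.mp
    cases ps with
    | nil => simp [mhTailJoin, PySem.Str.join, PySem.Chars.join, List.intercalate]
    | cons q qs =>
      simp only [mhTailJoin, String.toList_append,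
        mhJoin_comma_cons p (q :: qs) (by simp)]
      simp [List.append_assoc]

lemma mhFoldA_eq (models : List (String × List String)) :
    ∀ (todo pre used : List String) (h : String),
      mh2Keys models = pre ++ todo →
      (∀ j ∈ mh2Keys models, j ∈ used ↔ ∃ p ∈ pre, mhE (mh2Lookup models) p j = true) →
      (todo.foldl (mh2StepA models) (used, h)).2
        = mhHeaderFold h
            ((mhGroups (mh2Lookup models)
                (todo.filter (fun j => !decide (j ∈ used)))).map mhPart) := by
  intro todo
  induction todo with
  | nil =>
    intro pre used h _ _
    simp [mhHeaderFold, mhGroups]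
  | cons k t ih =>
    intro pre used h hsplit hused
    have hnd : (pre ++ k :: t).Nodup := hsplit ▸ PySem.List.nodup_dedup _
    have hkK : k ∈ mh2Keys models := by rw [hsplit]; simp
    by_cases hk : k ∈ used
    · -- k already used: skipped
      have hstep : mh2StepA models (used, h) k = (used, h) := by
        simp [mh2StepA, hk]
      rw [List.foldl_cons, hstep]
      rw [ih (pre ++ [k]) used h (by rw [hsplit]; simp) ?hu']
      case hu' =>
        intro j hj
        rw [hused j hj]
        constructor
        · rintro ⟨p, hp, hpj⟩; exact ⟨p, by simp [hp], hpj⟩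
        · rintro ⟨p, hp, hpj⟩
          rcases List.mem_append.mp hp with hp | hp
          · exact ⟨p, hp, hpj⟩
          · simp only [List.mem_singleton] at hp
            rw [hp] at hpj
            obtain ⟨q, hq, hqk⟩ := (hused k hkK).mp hk
            exact ⟨q, hq, mhEqual_trans hqk hpj⟩
      rw [List.filter_cons, if_neg (by simp [hk])]
    · -- k is a new group representative
      have hkpre : ∀ p ∈ pre, p ∈ used := by
        intro p hp
        have hpK : p ∈ mh2Keys models := by rw [hsplit]; simp [hp]
        exact (hused p hpK).mpr ⟨p, hp, mhEqual_refl _⟩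
      -- characterize res
      have hres_eq : findEqu_2 models (used ++ [k]) (PySem.Set.ofList (mh2Lookup models k))
          = t.filter (fun j => mhE (mh2Lookup models) k j) := by
        rw [findEqu_2_eq_filter, hsplit, List.filter_append, List.filter_cons]
        have h1 : pre.filter (fun j => !decide (j ∈ used ++ [k]) &&
            PySem.Set.equal (PySem.Set.ofList (mh2Lookup models k)) (PySem.Set.ofList (mh2Lookup models j))) = [] := by
          rw [List.filter_eq_nil_iff]
          intro p hp
          simp [hkpre p hp]
        rw [h1]
        rw [if_neg (by simp)]
        simp only [List.nil_append]
        apply List.filter_congr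
        intro j hj
        have hknt : k ∉ t := (List.nodup_cons.mp ((List.nodup_append.mp hnd).2.1)).1
        have hjne : j ≠ k := by
          intro he
          rw [he] at hj
          exact hknt hj
        have hjK : j ∈ mh2Keys models := by rw [hsplit]; simp [hj]
        by_cases hEkj : mhE (mh2Lookup models) k j = true
        · have hjused : j ∉ used := by
            intro hju
            obtain ⟨p, hp, hpj⟩ := (hused j hjK).mp hju
            exact hk ((hused k hkK).mpr ⟨p, hp, mhEqual_trans hpj (mhEqual_symm hEkj)⟩)
          have : ¬ j ∈ used ++ [k] := by simp [hjused, hjne]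
          simp only [mhE] at hEkj
          simp [this, hEkj, mhE]
        · simp only [mhE] at hEkj
          rw [Bool.not_eq_true] at hEkj
          simp [hEkj, mhE]
      -- the emitted part
      have hfilter_k : (k :: t).filter (fun j => !decide (j ∈ used))
          = k :: t.filter (fun j => !decide (j ∈ used)) := by
        rw [List.filter_cons, if_pos (by simp [hk])]
      have hknt : k ∉ t := (List.nodup_cons.mp ((List.nodup_append.mp hnd).2.1)).1
      have hEnotused : ∀ j ∈ t, mhE (mh2Lookup models) k j = true → j ∉ used := by
        intro j hj hEkj hju
        have hjK : j ∈ mh2Keys models := by rw [hsplit]; simp [hj]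
        obtain ⟨p, hp, hpj⟩ := (hused j hjK).mp hju
        exact hk ((hused k hkK).mpr ⟨p, hp, mhEqual_trans hpj (mhEqual_symm hEkj)⟩)
      -- the step in closed form
      have hstep : mh2StepA models (used, h) k
          = (used ++ [k] ++ t.filter (fun j => mhE (mh2Lookup models) k j),
             (if 0 < PySem.Str.len h then h ++ " , " else h)
               ++ mhPart (PySem.Set.ofList (mh2Lookup models k), mh2Lookup models k,
                    k :: t.filter (fun j => mhE (mh2Lookup models) k j))) := by
        simp only [mh2StepA, if_neg hk, hres_eq]
        by_cases hresnil : t.filter (fun j => mhE (mh2Lookup models) k j) = []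
        · rw [hresnil]
          simp only [List.length_nil, lt_irrefl, if_false, List.append_nil]
          rw [Prod.mk.injEq]
          refine ⟨rfl, ?_⟩
          have := mhPart_append1 (if 0 < PySem.Str.len h then h ++ " , " else h)
            (mh2Lookup models k) k
          rw [this]
          rfl
        · rw [if_pos (by simpa [List.length_pos_iff] using hresnil)]
          rw [Prod.mk.injEq]
          refine ⟨by simp [List.append_assoc], ?_⟩
          have := mhPart_append2 (if 0 < PySem.Str.len h then h ++ " , " else h)
            (mh2Lookup models k) k (t.filter (fun j => mhE (mh2Lookup models) k j)) hresnil
          rw [this]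
          rfl
      rw [List.foldl_cons, hstep]
      rw [ih (pre ++ [k]) _ _ (by rw [hsplit]; simp) ?hu2]
      case hu2 =>
        intro j hjK
        constructor
        · intro hju
          rcases List.mem_append.mp hju with hju | hju
          · rcases List.mem_append.mp hju with hju | hju
            · obtain ⟨p, hp, hpj⟩ := (hused j hjK).mp hju
              exact ⟨p, by simp [hp], hpj⟩
            · simp only [List.mem_singleton] at hju
              rw [hju]
              exact ⟨k, by simp, mhEqual_refl _⟩
          · have := List.mem_filter.mp hju
            exact ⟨k, by simp, this.2⟩
        · rintro ⟨p, hp, hpj⟩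
          rcases List.mem_append.mp hp with hp | hp
          · exact List.mem_append.mpr (Or.inl (List.mem_append.mpr
              (Or.inl ((hused j hjK).mpr ⟨p, hp, hpj⟩))))
          · simp only [List.mem_singleton] at hp
            rw [hp] at hpj
            -- j is equal-set to k: locate j in pre ++ k :: t
            rw [hsplit] at hjK
            rcases List.mem_append.mp hjK with hjpre | hjkt
            · exact List.mem_append.mpr (Or.inl (List.mem_append.mpr
                (Or.inl (hkpre j hjpre))))
            · rcases List.mem_cons.mp hjkt with hje | hjt
              · rw [hje]
                exact List.mem_append.mpr (Or.inl (List.mem_append.mpr (Or.inr (by simp))))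
              · exact List.mem_append.mpr (Or.inr (List.mem_filter.mpr ⟨hjt, hpj⟩))
      -- now rewrite the right-hand side into the same shape
      rw [hfilter_k]
      rw [mhGroups]
      have hhead : (t.filter (fun j => !decide (j ∈ used))).filter
            (fun j => mhE (mh2Lookup models) k j)
          = t.filter (fun j => mhE (mh2Lookup models) k j) := by
        rw [List.filter_filter]
        apply List.filter_congr
        intro j hj
        by_cases hEkj : mhE (mh2Lookup models) k j = true
        · simp [hEkj, hEnotused j hj hEkj]
        · rw [Bool.not_eq_true] at hEkj
          simp [hEkj]
      have htail : t.filter (fun j =>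
            !decide (j ∈ used ++ [k] ++ t.filter (fun j => mhE (mh2Lookup models) k j)))
          = (t.filter (fun j => !decide (j ∈ used))).filter
              (fun j => !mhE (mh2Lookup models) k j) := by
        rw [List.filter_filter]
        apply List.filter_congr
        intro j hj
        have hjne : j ≠ k := fun he => hknt (he ▸ hj)
        have hiff : (j ∈ used ++ [k] ++ t.filter (fun j => mhE (mh2Lookup models) k j))
            ↔ (j ∈ used ∨ mhE (mh2Lookup models) k j = true) := by
          constructor
          · intro hm
            rcases List.mem_append.mp hm with hm | hm
            · rcases List.mem_append.mp hm with hm | hm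
              · exact Or.inl hm
              · simp only [List.mem_singleton] at hm
                exact absurd hm hjne
            · exact Or.inr (List.mem_filter.mp hm).2
          · rintro (hm | hm)
            · exact List.mem_append.mpr (Or.inl (List.mem_append.mpr (Or.inl hm)))
            · exact List.mem_append.mpr (Or.inr (List.mem_filter.mpr ⟨hj, hm⟩))
        by_cases h1 : j ∈ used <;> by_cases h2 : mhE (mh2Lookup models) k j = true <;>
          simp [hiff, h1, h2, hjne, hj]
      rw [hhead, htail]
      simp only [List.map_cons]
      rfl

-- ===== VERDICT (by name: the statement is the Claim_ definition above) =====
theorem makeHeader_2_spec : Claim_equal_makeHeader_2 := by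
  intro code models _
  unfold Spec_makeHeader_2
  -- A's fold renders the canonical grouping
  have hA := mhFoldA_eq models (mh2Keys models) [] [] "" rfl (by simp)
  have hKfilter : (mh2Keys models).filter (fun j => !decide (j ∈ ([] : List String)))
      = mh2Keys models := by
    simp
  rw [hKfilter] at hA
  -- B's fold builds the canonical grouping
  have hB := mhFoldB_eq (mh2Lookup models) (mh2Keys models) [] List.Pairwise.nil
  simp only [List.map_nil, List.nil_append] at hB
  have hKfilter' : (mh2Keys models).filter
      (fun j => ([] : List (PySem.Set String × List String × List String)).all
        (fun g => !PySem.Set.equal g.1 (PySem.Set.ofList (mh2Lookup models j))))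
      = mh2Keys models := by
    simp
  rw [hKfilter'] at hB
  show (List.foldl (mh2StepA models) ([], "") (mh2Keys models)).2 = _
  rw [hA]
  rw [mhHeaderFold_nil _ (by
    intro p hp
    obtain ⟨g, _, rfl⟩ := List.mem_map.mp hp
    exact mhPart_ne g)]
  show _ = PySem.Str.join " , " (List.map _ (List.foldl _ [] (mh2Keys models)))
  rw [hB]
  rfl
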